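-- pv_equiv track=rewrite | github.com/sideeffects/GameDevelopmentToolset | src/PyFFI-2.1.11/pyffi/utils/__init__.py | unique_map
-- ===== SOURCE A (Python) =====
-- def unique_map(hash_generator):
--     """Return a map and inverse map to indentify unique values based
--     on hash, which is useful for removing duplicate data. If the hash
--     generator yields None then the value is mapped to None (useful for
--     discarding data).
--
--     >>> unique_map([])
--     ([], [])
--     >>> unique_map([3,2,6,None,1])
--     ([0, 1, 2, None, 3], [0, 1, 2, 4])
--     >>> unique_map([3,1,6,1])
--     ([0, 1, 2, 1], [0, 1, 2])
--     >>> unique_map([3,1,6,1,2,2,9,3,2])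
--     ([0, 1, 2, 1, 3, 3, 4, 0, 3], [0, 1, 2, 4, 6])
--     """
--     hash_map = [] # maps old index to new index
--     hash_map_inverse = [] # inverse: map new index to old index
--     hash_index_map = {None: None} # maps hash to new index (default for None)
--     new_index = 0
--     for old_index, hash_ in enumerate(hash_generator):
--         try:
--             hash_index = hash_index_map[hash_]
--         except KeyError:
--             # hash is new
--             hash_index_map[hash_] = new_index
--             hash_map.append(new_index)
--             hash_map_inverse.append(old_index)
--             new_index += 1
--         else:
--             # hash already exists
--             hash_map.append(hash_index)
--     return hash_map, hash_map_inverse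
-- ===== SOURCE B (Python) =====
-- def unique_map(hash_generator):
--     """Return a map and inverse map to identify unique values based on hash.
--
--     Table-first decomposition: materialize the values once, build the
--     hash->new-index table and the inverse map in one pass, then produce the
--     forward map as a lookup comprehension in a second pass.
--     """
--     values = list(hash_generator)
--     hash_index_map = {None: None}
--     hash_map_inverse = []
--     for old_index, hash_ in enumerate(values):
--         if hash_ not in hash_index_map:
--             hash_index_map[hash_] = len(hash_map_inverse)
--             hash_map_inverse.append(old_index)
--     hash_map = [hash_index_map[h] for h in values]
--     return hash_map, hash_map_inverse
-- ===== Notes on version B (the rewrite author's own statement) =====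
-- stated objective: alternative
-- what changed: A builds the forward map, inverse map and dict interleaved in a single try/except loop with an explicit new_index counter; B first builds the hash->index table (indexed by len(hash_map_inverse)) and the inverse in one pass, then produces the forward map as a separate lookup comprehension over the materialized values.
import Mathlib
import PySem

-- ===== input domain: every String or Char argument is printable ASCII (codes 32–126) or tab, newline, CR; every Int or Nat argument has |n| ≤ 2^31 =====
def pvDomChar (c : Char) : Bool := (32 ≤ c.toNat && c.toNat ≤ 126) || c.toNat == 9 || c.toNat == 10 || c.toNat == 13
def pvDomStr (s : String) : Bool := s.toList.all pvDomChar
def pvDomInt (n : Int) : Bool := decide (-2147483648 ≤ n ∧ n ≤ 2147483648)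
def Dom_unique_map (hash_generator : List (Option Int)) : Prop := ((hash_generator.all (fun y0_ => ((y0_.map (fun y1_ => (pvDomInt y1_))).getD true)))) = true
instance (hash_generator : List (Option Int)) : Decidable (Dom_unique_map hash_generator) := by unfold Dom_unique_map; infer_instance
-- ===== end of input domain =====

-- B rebuilds the same maps by a table-first decomposition: one pass builds the hash->index
-- table and the inverse, a second lookup pass produces the forward map (objective: alternative).

-- ===== PORT A =====
-- A's single loop: interleaved forward map / inverse / dict updates with a new_index counter.
def uniqueMapLoop (l : List (Option Int)) (old_index : Int)
    (hash_map : List (Option Int)) (hash_map_inverse : List Int)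
    (hash_index_map : PySem.Dict (Option Int) (Option Int)) (new_index : Int) :
    List (Option Int) × List Int :=
  match l with
  | [] => (hash_map, hash_map_inverse)
  | hash_ :: t =>
    match hash_index_map.get? hash_ with
    | some hash_index =>
        -- hash already exists
        uniqueMapLoop t (old_index + 1) (hash_map ++ [hash_index]) hash_map_inverse
          hash_index_map new_index
    | none =>
        -- hash is new (the KeyError branch)
        uniqueMapLoop t (old_index + 1) (hash_map ++ [some new_index])
          (hash_map_inverse ++ [old_index])
          (hash_index_map.insert hash_ (some new_index)) (new_index + 1)

def unique_map (hash_generator : List (Option Int)) : List (Option Int) × List Int :=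
  uniqueMapLoop hash_generator 0 [] [] (PySem.Dict.ofList [(none, none)]) 0

-- ===== PORT B =====
-- B's first pass: build the hash->index table (indexed by len(hash_map_inverse)) and the inverse.
def uniqueMapPass1 (l : List (Option Int)) (old_index : Int)
    (hash_index_map : PySem.Dict (Option Int) (Option Int)) (hash_map_inverse : List Int) :
    PySem.Dict (Option Int) (Option Int) × List Int :=
  match l with
  | [] => (hash_index_map, hash_map_inverse)
  | hash_ :: t =>
    if hash_index_map.contains hash_ then
      uniqueMapPass1 t (old_index + 1) hash_index_map hash_map_inverse
    else
      uniqueMapPass1 t (old_index + 1)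
        (hash_index_map.insert hash_ (some (hash_map_inverse.length : Int)))
        (hash_map_inverse ++ [old_index])

def unique_map_alt (hash_generator : List (Option Int)) : List (Option Int) × List Int :=
  let p := uniqueMapPass1 hash_generator 0 (PySem.Dict.ofList [(none, none)]) []
  -- second pass: hash_map = [hash_index_map[h] for h in values] (key always present)
  (hash_generator.map (fun h => (p.1.get? h).getD none), p.2)

-- ===== PRECONDITION & SPEC =====
def Spec_unique_map (hash_generator : List (Option Int)) (out : List (Option Int) × List Int) : Prop := out = unique_map_alt hash_generator
instance (hash_generator : List (Option Int)) (out : List (Option Int) × List Int) : Decidable (Spec_unique_map hash_generator out) := by unfold Spec_unique_map; infer_instance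

-- ===== CLAIM (what is proved, stated in full; the proofs are below) =====
def Claim_equal_unique_map : Prop := ∀ (hash_generator : List (Option Int)), Dom_unique_map hash_generator → Spec_unique_map hash_generator (unique_map hash_generator)

-- ===== LEMMAS AND PROOFS =====

-- pass1 never overwrites: an existing binding survives to the final table
theorem pass1_mono (l : List (Option Int)) :
    ∀ (i : Int) (d : PySem.Dict (Option Int) (Option Int)) (inv : List Int)
      (h : Option Int) (v : Option Int), d.get? h = some v →
      ((uniqueMapPass1 l i d inv).1).get? h = some v := by
  induction l with
  | nil => intro i d inv h v hv; simpa [uniqueMapPass1] using hv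
  | cons x t ih =>
    intro i d inv h v hv
    by_cases hc : d.contains x
    · simpa [uniqueMapPass1, hc] using ih (i + 1) d inv h v hv
    · have hne : h ≠ x := by
        intro he; subst he
        rw [PySem.Dict.contains_eq_isSome_get?, hv] at hc
        simp at hc
      have : (d.insert x (some (inv.length : Int))).get? h = some v := by
        rw [PySem.Dict.get?_insert_of_ne (hne := hne)]; exact hv
      simpa [uniqueMapPass1, hc] using
        ih (i + 1) (d.insert x (some (inv.length : Int))) (inv ++ [i]) h v this

-- A's loop, started with new_index = len(inverse), equals B's two passes
theorem loop_eq_pass1 (l : List (Option Int)) :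
    ∀ (i : Int) (hm : List (Option Int)) (inv : List Int)
      (d : PySem.Dict (Option Int) (Option Int)),
      uniqueMapLoop l i hm inv d (inv.length : Int) =
        (hm ++ l.map (fun h => (((uniqueMapPass1 l i d inv).1).get? h).getD none),
         (uniqueMapPass1 l i d inv).2) := by
  induction l with
  | nil => intro i hm inv d; simp [uniqueMapLoop, uniqueMapPass1]
  | cons x t ih =>
    intro i hm inv d
    cases hd : d.get? x with
    | some hi =>
      have hc : d.contains x = true := by
        rw [PySem.Dict.contains_eq_isSome_get?, hd]; rfl
      have hfin := pass1_mono t (i + 1) d inv x hi hd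
      simp only [uniqueMapLoop, uniqueMapPass1, hd, hc, if_pos, List.map_cons]
      rw [ih (i + 1) (hm ++ [hi]) inv d]
      simp [hfin]
    | none =>
      have hc : d.contains x = false := by
        rw [PySem.Dict.contains_eq_isSome_get?, hd]; rfl
      have hself : (d.insert x (some (inv.length : Int))).get? x
          = some (some (inv.length : Int)) := PySem.Dict.get?_insert_self d x _
      have hfin := pass1_mono t (i + 1) (d.insert x (some (inv.length : Int)))
        (inv ++ [i]) x (some (inv.length : Int)) hself
      have hlen : ((inv ++ [i]).length : Int) = (inv.length : Int) + 1 := by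
        simp
      simp only [uniqueMapLoop, uniqueMapPass1, hd, hc, if_neg, Bool.false_eq_true,
        not_false_iff, List.map_cons]
      rw [← hlen, ih (i + 1) (hm ++ [some (inv.length : Int)]) (inv ++ [i])
        (d.insert x (some (inv.length : Int)))]
      simp [hfin]

-- ===== VERDICT (by name: the statement is the Claim_ definition above) =====
theorem unique_map_spec : Claim_equal_unique_map := by
  intro hg _
  unfold Spec_unique_map unique_map unique_map_alt
  simpa using loop_eq_pass1 hg 0 [] [] (PySem.Dict.ofList [(none, none)])
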